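-- pv_equiv track=rewrite | github.com/rahqueu/fp-2021-2022-projects | projeto 1/project1_fp_2021_2022.py | obter_pin
-- ===== SOURCE A (Python) =====
-- def obter_posicao(cad_c, n):
--
--     if cad_c == 'C':
--         if n in [1,2,3]:
--             return n
--         return n-3
--
--     if cad_c == 'B':
--         if n in [7,8,9]:
--             return n
--         return n+3
--
--     if cad_c == 'D':
--         if n in [3,6,9]:
--             return n
--         return n+1
--
--     if cad_c == 'E':
--         if n in [1,4,7]:
--             return n
--         return n-1
--     return n
--
-- def obter_digito(cad_c, dig):
--
--     ''' ao consequentemente substituir o valor do dig, conseguimos encontrar o\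
--     digito final no final do forloop. '''
--     for i in range(0, len(cad_c)):
--         dig = obter_posicao(cad_c[i], dig)
--     return dig
--
-- def obter_pin(tpl):
--
--     dig = 5
--     res = ()
--
--     ''' encontrar todas as entradas invalidas e os digitos finais de cada el\
--     do tuplo. '''
--     if not isinstance(tpl, tuple) or not 4 <= len(tpl) <= 10:
--         raise ValueError("obter_pin: argumento invalido")
--
--     for el in tpl:
--         if len(el) < 1:
--             raise ValueError("obter_pin: argumento invalido")
--         for el2 in el:
--             if el2 not in ['C', 'B', 'D', 'E']:
--                 raise ValueError("obter_pin: argumento invalido")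
--         dig = obter_digito(el, dig)
--         res += (dig,)
--
--     return res
-- ===== SOURCE B (Python) =====
-- def obter_pin(tpl):
--     if not isinstance(tpl, tuple) or not 4 <= len(tpl) <= 10:
--         raise ValueError("obter_pin: argumento invalido")
--     row, col = 1, 1
--     res = ()
--     for el in tpl:
--         if len(el) < 1:
--             raise ValueError("obter_pin: argumento invalido")
--         for ch in el:
--             if ch == 'C':
--                 row = max(0, row - 1)
--             elif ch == 'B':
--                 row = min(2, row + 1)
--             elif ch == 'D':
--                 col = min(2, col + 1)
--             elif ch == 'E':
--                 col = max(0, col - 1)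
--             else:
--                 raise ValueError("obter_pin: argumento invalido")
--         res += (row * 3 + col + 1,)
--     return res
-- ===== Notes on version B (the rewrite author's own statement) =====
-- stated objective: simpler
-- what changed: Replaces the per-digit boundary-membership case analysis (lists of edge digits per direction) with (row,col) coordinates clamped arithmetically to [0,2], converting back only when a digit is emitted.
import Mathlib
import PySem

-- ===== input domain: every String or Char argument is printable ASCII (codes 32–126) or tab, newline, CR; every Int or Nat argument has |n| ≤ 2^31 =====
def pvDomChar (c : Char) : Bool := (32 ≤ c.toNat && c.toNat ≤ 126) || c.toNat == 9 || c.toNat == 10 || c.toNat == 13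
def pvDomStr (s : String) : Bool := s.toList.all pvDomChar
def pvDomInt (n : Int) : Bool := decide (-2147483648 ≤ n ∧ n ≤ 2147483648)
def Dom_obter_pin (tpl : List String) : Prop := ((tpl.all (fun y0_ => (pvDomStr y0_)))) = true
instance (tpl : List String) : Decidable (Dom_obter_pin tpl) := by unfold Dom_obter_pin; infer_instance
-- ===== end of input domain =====

-- ===== PORT A =====
-- B replaces A's boundary-membership case analysis with clamped (row,col) coordinate arithmetic; same validation and return value.
def obter_posicao (cad_c : Char) (n : Int) : Int :=
  if cad_c = 'C' then (if n ∈ ([1,2,3] : List Int) then n else n - 3)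
  else if cad_c = 'B' then (if n ∈ ([7,8,9] : List Int) then n else n + 3)
  else if cad_c = 'D' then (if n ∈ ([3,6,9] : List Int) then n else n + 1)
  else if cad_c = 'E' then (if n ∈ ([1,4,7] : List Int) then n else n - 1)
  else n

def obter_digito (cad_c : String) (dig : Int) : Int :=
  cad_c.toList.foldl (fun d c => obter_posicao c d) dig

-- the loop body of A; `none` marks the raise of ValueError (excluded by Pre_)
def obterPinLoop (l : List String) (dig : Int) : Option (List Int) :=
  match l with
  | [] => some []
  | el :: rest =>
    if el.toList.length < 1 then none
    else if ¬ (∀ c ∈ el.toList, c ∈ (['C','B','D','E'] : List Char)) then none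
    else
      let d := obter_digito el dig
      match obterPinLoop rest d with
      | none => none
      | some r => some (d :: r)

def obter_pin (tpl : List String) : List Int :=
  if ¬ (4 ≤ tpl.length ∧ tpl.length ≤ 10) then []
  else (obterPinLoop tpl 5).getD []

-- ===== PORT B =====
-- one keypress: adjust the clamped coordinates; `none` = invalid character (raise)
def altStep (rc : Option (Int × Int)) (ch : Char) : Option (Int × Int) :=
  match rc with
  | none => none
  | some (r, c) =>
    if ch = 'C' then some (max 0 (r - 1), c)
    else if ch = 'B' then some (min 2 (r + 1), c)
    else if ch = 'D' then some (r, min 2 (c + 1))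
    else if ch = 'E' then some (r, max 0 (c - 1))
    else none

def altLoop (l : List String) (r c : Int) : Option (List Int) :=
  match l with
  | [] => some []
  | el :: rest =>
    if el.toList.length < 1 then none
    else
      match el.toList.foldl altStep (some (r, c)) with
      | none => none
      | some (r', c') =>
        match altLoop rest r' c' with
        | none => none
        | some res => some ((r' * 3 + c' + 1) :: res)

def obter_pin_alt (tpl : List String) : List Int :=
  if ¬ (4 ≤ tpl.length ∧ tpl.length ≤ 10) then []
  else (altLoop tpl 1 1).getD []

-- ===== PRECONDITION & SPEC =====
-- Pre_ excludes exactly the inputs on which A raises ValueError: wrong length, an empty element, or a character outside {C,B,D,E}.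
def Pre_obter_pin (tpl : List String) : Prop :=
  4 ≤ tpl.length ∧ tpl.length ≤ 10 ∧
  (tpl.all (fun s => !s.toList.isEmpty &&
    s.toList.all (fun c => (['C','B','D','E'] : List Char).contains c))) = true
instance (tpl : List String) : Decidable (Pre_obter_pin tpl) := by unfold Pre_obter_pin; infer_instance
def pvWitness_obter_pin : List String := ["C", "BD", "E", "CB"]

def Spec_obter_pin (tpl : List String) (out : List Int) : Prop := out = obter_pin_alt tpl
instance (tpl : List String) (out : List Int) : Decidable (Spec_obter_pin tpl out) := by unfold Spec_obter_pin; infer_instance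

-- ===== CLAIM (what is proved, stated in full; the proofs are below) =====
def Claim_equal_obter_pin : Prop := ∀ (tpl : List String), Dom_obter_pin tpl → Pre_obter_pin tpl → Spec_obter_pin tpl (obter_pin tpl)

-- ===== LEMMAS AND PROOFS =====

-- one keypress: the coordinate step matches A's digit step, and stays in bounds
lemma step_eq (ch : Char) (r c : Int)
    (hr : 0 ≤ r ∧ r ≤ 2) (hc : 0 ≤ c ∧ c ≤ 2)
    (hch : ch ∈ (['C','B','D','E'] : List Char)) :
    ∃ r' c', altStep (some (r, c)) ch = some (r', c') ∧
      obter_posicao ch (r * 3 + c + 1) = r' * 3 + c' + 1 ∧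
      0 ≤ r' ∧ r' ≤ 2 ∧ 0 ≤ c' ∧ c' ≤ 2 := by
  fin_cases hch
  · refine ⟨max 0 (r - 1), c, by simp [altStep], ?_, le_max_left _ _, max_le (by omega) (by omega), hc.1, hc.2⟩
    simp [obter_posicao]
    rcases max_cases 0 (r - 1) with ⟨h1, h2⟩ | ⟨h1, h2⟩ <;> rw [h1] <;> split_ifs <;> omega
  · refine ⟨min 2 (r + 1), c, by simp [altStep], ?_, le_min (by omega) (by omega), min_le_left _ _, hc.1, hc.2⟩
    simp [obter_posicao]
    rcases min_cases 2 (r + 1) with ⟨h1, h2⟩ | ⟨h1, h2⟩ <;> rw [h1] <;> split_ifs <;> omega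
  · refine ⟨r, min 2 (c + 1), by simp [altStep], ?_, hr.1, hr.2, le_min (by omega) (by omega), min_le_left _ _⟩
    simp [obter_posicao]
    rcases min_cases 2 (c + 1) with ⟨h1, h2⟩ | ⟨h1, h2⟩ <;> rw [h1] <;> split_ifs <;> omega
  · refine ⟨r, max 0 (c - 1), by simp [altStep], ?_, hr.1, hr.2, le_max_left _ _, max_le (by omega) (by omega)⟩
    simp [obter_posicao]
    rcases max_cases 0 (c - 1) with ⟨h1, h2⟩ | ⟨h1, h2⟩ <;> rw [h1] <;> split_ifs <;> omega

-- one element: the coordinate fold matches obter_digito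
lemma fold_eq (cs : List Char) (r c : Int)
    (hr : 0 ≤ r ∧ r ≤ 2) (hc : 0 ≤ c ∧ c ≤ 2)
    (hall : ∀ ch ∈ cs, ch ∈ (['C','B','D','E'] : List Char)) :
    ∃ r' c', cs.foldl altStep (some (r, c)) = some (r', c') ∧
      cs.foldl (fun d ch => obter_posicao ch d) (r * 3 + c + 1) = r' * 3 + c' + 1 ∧
      0 ≤ r' ∧ r' ≤ 2 ∧ 0 ≤ c' ∧ c' ≤ 2 := by
  induction cs generalizing r c with
  | nil => exact ⟨r, c, rfl, rfl, hr.1, hr.2, hc.1, hc.2⟩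
  | cons ch cs ih =>
    obtain ⟨r1, c1, hstep, hdig, hb1, hb2, hb3, hb4⟩ :=
      step_eq ch r c hr hc (hall ch (List.mem_cons_self))
    obtain ⟨r', c', h1, h2, hb⟩ :=
      ih r1 c1 ⟨hb1, hb2⟩ ⟨hb3, hb4⟩ (fun x hx => hall x (List.mem_cons_of_mem _ hx))
    exact ⟨r', c', by simpa [List.foldl, hstep] using h1, by simpa [List.foldl, hdig] using h2, hb⟩

-- the outer loop: both loops agree starting from matching states
lemma loop_eq (l : List String) (r c : Int)
    (hr : 0 ≤ r ∧ r ≤ 2) (hc : 0 ≤ c ∧ c ≤ 2)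
    (hall : ∀ s ∈ l, s.toList ≠ [] ∧ ∀ ch ∈ s.toList, ch ∈ (['C','B','D','E'] : List Char)) :
    obterPinLoop l (r * 3 + c + 1) = altLoop l r c := by
  induction l generalizing r c with
  | nil => rfl
  | cons el rest ih =>
    obtain ⟨hne, hchars⟩ := hall el List.mem_cons_self
    obtain ⟨r', c', hfold, hdig, hb1, hb2, hb3, hb4⟩ := fold_eq el.toList r c hr hc hchars
    have hlen : ¬ el.toList.length < 1 := by
      cases h : el.toList with
      | nil => exact absurd h hne
      | cons a t => simp
    have hrec := ih r' c' ⟨hb1, hb2⟩ ⟨hb3, hb4⟩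
      (fun s hs => hall s (List.mem_cons_of_mem _ hs))
    simp only [obterPinLoop, altLoop]
    rw [if_neg hlen, if_neg hlen, if_neg (not_not_intro hchars), hfold]
    simp only [obter_digito, hdig, hrec]

-- ===== VERDICT (by name: the statement is the Claim_ definition above) =====
theorem obter_pin_spec : Claim_equal_obter_pin := by
  intro tpl _ hpre
  obtain ⟨h1, h2, h3⟩ := hpre
  have h3' : ∀ s ∈ tpl, s.toList ≠ [] ∧ ∀ c ∈ s.toList, c ∈ (['C','B','D','E'] : List Char) := by
    intro s hs
    have hb := List.all_eq_true.mp h3 s hs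
    simp only [Bool.and_eq_true, Bool.not_eq_eq_eq_not, Bool.not_true, List.all_eq_true,
      List.contains_eq_mem, decide_eq_true_eq, List.isEmpty_eq_false_iff] at hb
    exact ⟨hb.1, hb.2⟩
  unfold Spec_obter_pin obter_pin obter_pin_alt
  have hlen : ¬ ¬ (4 ≤ tpl.length ∧ tpl.length ≤ 10) := by omega
  rw [if_neg hlen, if_neg hlen]
  have : (5 : Int) = 1 * 3 + 1 + 1 := by norm_num
  rw [this, loop_eq tpl 1 1 (by omega) (by omega) h3']
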